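-- pv_equiv track=rewrite | github.com/Sergoman4/module2hard.py | 1.py | generate_password
-- ===== SOURCE A (Python) =====
-- def generate_password(n):
--     if not 3 <= n <= 20:
--         return "Число должно быть от 3 до 20."
--     password = ""
--     used_numbers = set()
--     for i in range(1, n + 1):
--         for j in range(i + 1, n + 1):
--             if (i + j) % n == 0 and i not in used_numbers and j not in used_numbers:
--                 password += str(i) + str(j)
--                 used_numbers.add(i)
--                 used_numbers.add(j)
--     return password
-- ===== SOURCE B (Python) =====
-- def generate_password(n):
--     if not 3 <= n <= 20:
--         return "Число должно быть от 3 до 20."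
--     return "".join(str(i) + str(n - i) for i in range(1, (n - 1) // 2 + 1))
-- ===== Notes on version B (the rewrite author's own statement) =====
-- stated objective: simpler
-- what changed: Replaces the O(n^2) double loop with used-set bookkeeping by a single direct loop: the only qualifying pairs sum to n with the smaller element first, so B joins str(i)+str(n-i) for i in 1..(n-1)//2.
import Mathlib
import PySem

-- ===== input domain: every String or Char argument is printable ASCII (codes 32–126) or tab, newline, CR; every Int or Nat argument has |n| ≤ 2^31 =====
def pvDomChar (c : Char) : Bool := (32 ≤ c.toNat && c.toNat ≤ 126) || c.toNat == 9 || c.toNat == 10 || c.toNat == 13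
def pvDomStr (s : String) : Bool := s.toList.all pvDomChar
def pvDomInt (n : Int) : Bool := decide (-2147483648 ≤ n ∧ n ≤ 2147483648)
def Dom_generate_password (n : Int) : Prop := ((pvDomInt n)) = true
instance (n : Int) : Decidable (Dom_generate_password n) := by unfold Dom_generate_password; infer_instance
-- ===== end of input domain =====

set_option maxRecDepth 4000


-- B replaces A's quadratic double loop with a single direct loop over i = 1..(n-1)//2 emitting str(i)+str(n-i) (simpler; same string).
-- ===== PORT A =====
-- literal port of A: nested range loops accumulating (password, used_numbers)
def generate_password (n : Int) : String :=
  if ¬ (3 ≤ n ∧ n ≤ 20) then "Число должно быть от 3 до 20."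
  else
    let st :=
      (PySem.List.pyRange 1 (n + 1) 1).foldl (fun (st : String × PySem.Set Int) i =>
        (PySem.List.pyRange (i + 1) (n + 1) 1).foldl (fun st j =>
          if PySem.Int.mod (i + j) n = 0 ∧ ¬ PySem.Set.contains st.2 i ∧ ¬ PySem.Set.contains st.2 j then
            (st.1 ++ PySem.Int.toStr i ++ PySem.Int.toStr j,
             PySem.Set.add (PySem.Set.add st.2 i) j)
          else st) st)
        ("", PySem.Set.empty)
    st.1

-- ===== PORT B =====
-- B: same guard, then join str(i)+str(n-i) for i in 1..(n-1)//2 — one pass, no set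
def generate_password_alt (n : Int) : String :=
  if ¬ (3 ≤ n ∧ n ≤ 20) then "Число должно быть от 3 до 20."
  else
    String.join ((PySem.List.pyRange 1 (PySem.Int.floordiv (n - 1) 2 + 1) 1).map
      (fun i => PySem.Int.toStr i ++ PySem.Int.toStr (n - i)))

-- ===== PRECONDITION & SPEC =====
def Spec_generate_password (n : Int) (out : String) : Prop := out = generate_password_alt n
instance (n : Int) (out : String) : Decidable (Spec_generate_password n out) := by unfold Spec_generate_password; infer_instance

-- ===== CLAIM (what is proved, stated in full; the proofs are below) =====
def Claim_equal_generate_password : Prop := ∀ (n : Int), Dom_generate_password n → Spec_generate_password n (generate_password n)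

-- ===== LEMMAS AND PROOFS =====
theorem gp_guard (n : Int) (h : ¬ (3 ≤ n ∧ n ≤ 20)) :
    generate_password n = generate_password_alt n := by
  simp only [generate_password, generate_password_alt, if_pos h]

-- ===== VERDICT (by name: the statement is the Claim_ definition above) =====
theorem generate_password_spec : Claim_equal_generate_password := by
  intro n _
  show generate_password n = generate_password_alt n
  by_cases h : 3 ≤ n ∧ n ≤ 20
  · obtain ⟨h1, h2⟩ := h
    interval_cases n <;> decide
  · exact gp_guard n h
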